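-- pv_equiv track=rewrite | github.com/Intruder9211/DSA-2025 | DAY-03/02_Enchanted_Lanterns.py | calculate_wish_value
-- ===== SOURCE A (Python) =====
-- def calculate_wish_value(brightness):
--     n = len(brightness)
--     max_from_right = [0] * n
--     min_from_left = [0] * n
--
--     # Fill max_from_right
--     max_from_right[-1] = brightness[-1]
--     for i in range(n - 2, -1, -1):
--         max_from_right[i] = max(brightness[i], max_from_right[i + 1])
--
--     # Fill min_from_left
--     min_from_left[0] = brightness[0]
--     for i in range(1, n):
--         min_from_left[i] = min(brightness[i], min_from_left[i - 1])
--
--     # Calculate total wish value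
--     total_wish_value = 0
--     for i in range(n):
--         total_wish_value += abs(max_from_right[i] - min_from_left[i])
--
--     return total_wish_value
-- ===== SOURCE B (Python) =====
-- def calculate_wish_value(brightness):
--     # Sort-then-scan: sort the indices by value; scanning ascending, each index
--     # that lowers the "bound" is a prefix-min record and the minimum holds for
--     # the whole run [i, bound); scanning descending (reversed order), each index
--     # that raises the bound is a suffix-max record holding on (bound, i].
--     # Since suffix-max >= prefix-min everywhere, abs is redundant and the answer
--     # is sum(suffix maxima) - sum(prefix minima).
--     n = len(brightness)
--     order = sorted(range(n), key=lambda i: brightness[i])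
--     bound = n
--     total = 0
--     for i in order:                 # ascending values: prefix-min contributions
--         if i < bound:
--             total -= (bound - i) * brightness[i]
--             bound = i
--     bound = -1
--     for i in reversed(order):       # descending values: suffix-max contributions
--         if i > bound:
--             total += (i - bound) * brightness[i]
--             bound = i
--     return total
-- ===== Notes on version B (the rewrite author's own statement) =====
-- stated objective: alternative
-- what changed: Replaces A's three passes with two per-index recurrence arrays by a sort-then-scan contribution count: sort the indices by value, then one ascending scan charges each prefix-min record for its whole run and one descending scan charges each suffix-max record, so the answer is sum(suffix maxima) - sum(prefix minima) with no per-index arrays and no abs.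
import Mathlib
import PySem

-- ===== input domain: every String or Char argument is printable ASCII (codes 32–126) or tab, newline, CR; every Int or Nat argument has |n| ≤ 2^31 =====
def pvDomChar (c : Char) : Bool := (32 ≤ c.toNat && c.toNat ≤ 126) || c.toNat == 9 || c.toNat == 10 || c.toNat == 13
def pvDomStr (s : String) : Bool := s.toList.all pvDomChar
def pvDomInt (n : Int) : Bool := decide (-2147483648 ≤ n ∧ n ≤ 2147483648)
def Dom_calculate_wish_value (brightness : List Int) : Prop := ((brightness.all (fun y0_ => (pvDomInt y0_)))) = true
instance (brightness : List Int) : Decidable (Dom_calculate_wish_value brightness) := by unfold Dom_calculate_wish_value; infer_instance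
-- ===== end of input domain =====

-- B replaces A's three passes over two per-index recurrence arrays by a sort-then-scan
-- contribution count: sort the indices by value, charge each prefix-min record for its whole
-- run ascending and each suffix-max record descending; answer = Σ suffix maxima − Σ prefix minima.

-- ===== PORT A =====
def calculate_wish_value (brightness : List Int) : Int :=
  let n : Int := brightness.length
  let max_from_right := List.replicate brightness.length (0 : Int)
  let min_from_left := List.replicate brightness.length (0 : Int)
  let max_from_right := PySem.List.pySetD max_from_right (-1) (PySem.List.pyGetD brightness (-1) 0)
  let max_from_right := (PySem.List.pyRange (n - 2) (-1) (-1)).foldl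
    (fun arr i => PySem.List.pySetD arr i
      (max (PySem.List.pyGetD brightness i 0) (PySem.List.pyGetD arr (i + 1) 0))) max_from_right
  let min_from_left := PySem.List.pySetD min_from_left 0 (PySem.List.pyGetD brightness 0 0)
  let min_from_left := (PySem.List.pyRange 1 n 1).foldl
    (fun arr i => PySem.List.pySetD arr i
      (min (PySem.List.pyGetD brightness i 0) (PySem.List.pyGetD arr (i - 1) 0))) min_from_left
  (PySem.List.pyRange 0 n 1).foldl
    (fun acc i => acc + |PySem.List.pyGetD max_from_right i 0 - PySem.List.pyGetD min_from_left i 0|) 0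

-- ===== PORT B =====
def calculate_wish_value_alt (brightness : List Int) : Int :=
  let n : Int := brightness.length
  let order := PySem.List.sorted (PySem.List.pyRange 0 n 1)
    (fun i => PySem.List.pyGetD brightness i 0) false
  let s1 := order.foldl
    (fun (s : Int × Int) i =>
      if i < s.1 then (i, s.2 - (s.1 - i) * PySem.List.pyGetD brightness i 0) else s) (n, 0)
  let s2 := order.reverse.foldl
    (fun (s : Int × Int) i =>
      if s.1 < i then (i, s.2 + (i - s.1) * PySem.List.pyGetD brightness i 0) else s) (-1, s1.2)
  s2.2

-- ===== PRECONDITION & SPEC =====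
-- A raises IndexError on the empty list (max_from_right[-1] = brightness[-1]); Pre_ excludes it.
def Pre_calculate_wish_value (brightness : List Int) : Prop := brightness ≠ []
instance (brightness : List Int) : Decidable (Pre_calculate_wish_value brightness) := by
  unfold Pre_calculate_wish_value; infer_instance
def pvWitness_calculate_wish_value : List Int := [3, 1, 4]
def Spec_calculate_wish_value (brightness : List Int) (out : Int) : Prop := out = calculate_wish_value_alt brightness
instance (brightness : List Int) (out : Int) : Decidable (Spec_calculate_wish_value brightness out) := by
  unfold Spec_calculate_wish_value; infer_instance

-- ===== CLAIM (what is proved, stated in full; the proofs are below) =====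
def Claim_equal_calculate_wish_value : Prop := ∀ (brightness : List Int), Dom_calculate_wish_value brightness → Pre_calculate_wish_value brightness → Spec_calculate_wish_value brightness (calculate_wish_value brightness)

-- ===== LEMMAS AND PROOFS =====

-- prefix-minima list: pmf x t = [min xs[0..i] for i] where xs = x :: t
def pmf : Int → List Int → List Int
  | x, [] => [x]
  | x, b :: t => x :: pmf (min b x) t

-- suffix-maxima list: smf xs = [max xs[i..] for i]
def smf : List Int → List Int
  | [] => []
  | a :: t =>
    match smf t with
    | [] => [a]
    | b :: u => max a b :: b :: u

theorem smf_ne_nil (a : Int) (t : List Int) : smf (a :: t) ≠ [] := by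
  cases h : smf t with
  | nil => simp [smf, h]
  | cons c v => simp [smf, h]

theorem smf_cons₂ (a b : Int) (u : List Int) :
    smf (a :: b :: u) = max a ((smf (b :: u)).headI) :: smf (b :: u) := by
  cases h : smf (b :: u) with
  | nil => exact absurd h (smf_ne_nil b u)
  | cons c v =>
    conv_lhs => rw [smf.eq_def]
    simp [h]

theorem length_smf (xs : List Int) : (smf xs).length = xs.length := by
  induction xs with
  | nil => rfl
  | cons a t ih =>
    cases t with
    | nil => simp [smf]
    | cons b u => rw [smf_cons₂]; simp at ih ⊢; omega

theorem length_pmf (x : Int) (t : List Int) : (pmf x t).length = t.length + 1 := by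
  induction t generalizing x with
  | nil => rfl
  | cons b u ih => simp [pmf, ih]

theorem pmf_getD_zero (x : Int) (t : List Int) : (pmf x t).getD 0 0 = x := by
  cases t <;> simp [pmf]

theorem pmf_getD_succ (t : List Int) (x : Int) (j : Nat) (hj : j < t.length) :
    (pmf x t).getD (j+1) 0 = min (t.getD j 0) ((pmf x t).getD j 0) := by
  induction t generalizing x j with
  | nil => simp at hj
  | cons b u ih =>
    cases j with
    | zero => simp only [pmf, List.getD_cons_succ, List.getD_cons_zero, pmf_getD_zero]
    | succ j =>
      simp only [pmf, List.getD_cons_succ]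
      exact ih (min b x) j (by simpa using hj)

theorem smf_getD_succ (xs : List Int) (j : Nat) (hj : j + 1 < xs.length) :
    (smf xs).getD j 0 = max (xs.getD j 0) ((smf xs).getD (j+1) 0) := by
  induction xs generalizing j with
  | nil => simp at hj
  | cons a t ih =>
    cases t with
    | nil => simp at hj
    | cons b u =>
      rw [smf_cons₂]
      cases j with
      | zero =>
        obtain ⟨c, v, hc⟩ := List.exists_cons_of_ne_nil (smf_ne_nil b u)
        simp [hc]
      | succ j =>
        simp only [List.getD_cons_succ]
        exact ih j (by simpa using hj)

theorem smf_last (xs : List Int) (j : Nat) (hj : j + 1 = xs.length) :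
    (smf xs).getD j 0 = xs.getD j 0 := by
  induction xs generalizing j with
  | nil => simp at hj
  | cons a t ih =>
    cases t with
    | nil =>
      have : j = 0 := by simpa using hj
      simp [this, smf]
    | cons b u =>
      rw [smf_cons₂]
      cases j with
      | zero => simp at hj
      | succ j =>
        simp only [List.getD_cons_succ]
        exact ih j (by simpa using hj)

-- pmin characterisation (1): the prefix minimum is ≤ every entry of the prefix
theorem pmf_le_entry (t : List Int) (x : Int) (i j : Nat) (hj : j ≤ i) (hi : i ≤ t.length) :
    (pmf x t).getD i 0 ≤ (x :: t).getD j 0 := by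
  induction t generalizing x i j with
  | nil =>
    have hi0 : i = 0 := Nat.le_zero.mp hi
    have hj0 : j = 0 := by omega
    subst hi0; subst hj0; simp [pmf]
  | cons b u ih =>
    cases i with
    | zero =>
      have hj0 : j = 0 := Nat.le_zero.mp hj
      subst hj0; simp [pmf]
    | succ i =>
      have hstep : (pmf x (b :: u)).getD (i+1) 0 = (pmf (min b x) u).getD i 0 := by
        simp [pmf]
      rw [hstep]
      cases j with
      | zero =>
        calc (pmf (min b x) u).getD i 0 ≤ (min b x :: u).getD 0 0 :=
              ih (min b x) i 0 (Nat.zero_le _) (by simpa using hi)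
          _ ≤ (x :: b :: u).getD 0 0 := by simp
      | succ j =>
        cases j with
        | zero =>
          calc (pmf (min b x) u).getD i 0 ≤ (min b x :: u).getD 0 0 :=
                ih (min b x) i 0 (Nat.zero_le _) (by simpa using hi)
            _ ≤ (x :: b :: u).getD 1 0 := by simp
        | succ j =>
          have := ih (min b x) i (j+1) (by omega) (by simpa using hi)
          simpa using this
-- pmin characterisation (2): the prefix minimum is attained at some index of the prefix
theorem pmf_attained (t : List Int) (x : Int) (i : Nat) (hi : i ≤ t.length) :
    ∃ j, j ≤ i ∧ (pmf x t).getD i 0 = (x :: t).getD j 0 := by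
  induction t generalizing x i with
  | nil => exact ⟨0, Nat.le_zero.mp hi ▸ le_rfl, by simp [Nat.le_zero.mp hi, pmf]⟩
  | cons b u ih =>
    cases i with
    | zero => exact ⟨0, le_rfl, by simp [pmf]⟩
    | succ i =>
      have hstep : (pmf x (b :: u)).getD (i+1) 0 = (pmf (min b x) u).getD i 0 := by
        simp [pmf]
      obtain ⟨j, hj, hv⟩ := ih (min b x) i (by simpa using hi)
      cases j with
      | zero =>
        rcases min_cases b x with ⟨he, _⟩ | ⟨he, _⟩
        · exact ⟨1, by omega, by rw [hstep, hv]; simp [he]⟩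
        · exact ⟨0, by omega, by rw [hstep, hv]; simp [he]⟩
      | succ j => exact ⟨j + 2, by omega, by rw [hstep, hv]; simp⟩

-- smax characterisation (1): the suffix maximum dominates every entry of the suffix
theorem entry_le_smf (xs : List Int) (i j : Nat) (hij : i ≤ j) (hj : j < xs.length) :
    xs.getD j 0 ≤ (smf xs).getD i 0 := by
  induction xs generalizing i j with
  | nil => simp at hj
  | cons a t ih =>
    cases t with
    | nil =>
      have : j = 0 := by simpa using hj
      have : i = 0 := by omega
      simp_all [smf]
    | cons b u =>
      rw [smf_cons₂]
      cases i with
      | zero =>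
        obtain ⟨c, v, hc⟩ := List.exists_cons_of_ne_nil (smf_ne_nil b u)
        cases j with
        | zero => simp [hc]
        | succ j =>
          have := ih 0 j (Nat.zero_le _) (by simpa using hj)
          rw [hc] at this ⊢
          simp only [List.getD_cons_zero] at this ⊢
          simp only [List.getD_cons_succ]
          exact le_trans this (le_max_right _ _)
      | succ i =>
        cases j with
        | zero => omega
        | succ j =>
          simp only [List.getD_cons_succ]
          exact ih i j (by omega) (by simpa using hj)

-- smax characterisation (2): the suffix maximum is attained at some index of the suffix
theorem smf_attained (xs : List Int) (i : Nat) (hi : i < xs.length) :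
    ∃ j, i ≤ j ∧ j < xs.length ∧ (smf xs).getD i 0 = xs.getD j 0 := by
  induction xs generalizing i with
  | nil => simp at hi
  | cons a t ih =>
    cases t with
    | nil =>
      have hi0 : i = 0 := by simp at hi; omega
      subst hi0
      exact ⟨0, le_rfl, by simp, by simp [smf]⟩
    | cons b u =>
      rw [smf_cons₂]
      cases i with
      | zero =>
        obtain ⟨c, v, hc⟩ := List.exists_cons_of_ne_nil (smf_ne_nil b u)
        rcases max_cases a ((smf (b :: u)).headI) with ⟨he, _⟩ | ⟨he, _⟩
        · exact ⟨0, le_rfl, by simp, by simp [he]⟩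
        · obtain ⟨j, hj1, hj2, hv⟩ := ih 0 (by simp)
          refine ⟨j + 1, by omega, by simpa using hj2, ?_⟩
          have hh : (smf (b :: u)).headI = (smf (b :: u)).getD 0 0 := by rw [hc]; simp
          simp only [List.getD_cons_zero, List.getD_cons_succ]
          rw [he, hh, hv]
      | succ i =>
        obtain ⟨j, hj1, hj2, hv⟩ := ih i (by simpa using hi)
        exact ⟨j + 1, by omega, by simpa using hj2, by simpa using hv⟩

-- sum of a constant run, take form
theorem sum_take_const (l : List Int) (v : Int) (hN : Nat) :
    ∀ (bN : Nat), hN ≤ bN → bN ≤ l.length → (∀ i, hN ≤ i → i < bN → l.getD i 0 = v) →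
    (l.take bN).sum = (l.take hN).sum + ((bN : Int) - hN) * v := by
  intro bN
  induction bN with
  | zero =>
    intro h1 _ _
    have h0 : hN = 0 := by omega
    subst h0
    simp
  | succ bN ih =>
    intro h1 h2 hc
    by_cases he : hN = bN + 1
    · simp [he]
    · have hlt : bN < l.length := by omega
      rw [List.sum_take_succ l bN hlt, ih (by omega) (by omega) (fun i a b => hc i a (by omega))]
      have : l[bN] = v := by
        have hg : l.getD bN 0 = l[bN] := List.getD_eq_getElem l 0 hlt
        rw [← hg]; exact hc bN (by omega) (by omega)
      rw [this]
      push_cast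
      ring

-- sum of a constant run, drop form
theorem sum_drop_const (l : List Int) (v : Int) (kN : Nat) :
    ∀ (mN : Nat), kN ≤ mN → mN ≤ l.length → (∀ i, kN ≤ i → i < mN → l.getD i 0 = v) →
    (l.drop kN).sum = ((mN : Int) - kN) * v + (l.drop mN).sum := by
  intro mN
  induction mN with
  | zero =>
    intro h1 _ _
    have h0 : kN = 0 := by omega
    subst h0
    simp
  | succ mN ih =>
    intro h1 h2 hc
    by_cases he : kN = mN + 1
    · simp [he]
    · have hlt : mN < l.length := by omega
      rw [ih (by omega) (by omega) (fun i a b => hc i a (by omega)),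
          List.drop_eq_getElem_cons hlt, List.sum_cons]
      have : l[mN] = v := by
        have hg : l.getD mN 0 = l[mN] := List.getD_eq_getElem l 0 hlt
        rw [← hg]; exact hc mN (by omega) (by omega)
      rw [this]
      push_cast
      ring

-- ascending scan: any value-sorted cover of [0, b) accumulates −Σ prefix minima over [0, b)
theorem ascLoop (x : Int) (t : List Int) :
    ∀ (is : List Int) (b tot : Int),
    is.Pairwise (fun a c => PySem.List.pyGetD (x :: t) a 0 ≤ PySem.List.pyGetD (x :: t) c 0) →
    (∀ j : Int, 0 ≤ j → j < b → j ∈ is) →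
    (∀ i ∈ is, 0 ≤ i) →
    0 ≤ b → b ≤ (x :: t).length →
    (is.foldl
      (fun (s : Int × Int) i =>
        if i < s.1 then (i, s.2 - (s.1 - i) * PySem.List.pyGetD (x :: t) i 0) else s) (b, tot)).2
      = tot - ((pmf x t).take b.toNat).sum := by
  intro is
  induction is with
  | nil =>
    intro b tot _ hcov _ hb0 _
    have hb : b = 0 := by
      by_contra h
      exact absurd (hcov 0 le_rfl (by omega)) (by simp)
    simp [hb]
  | cons h rest ih =>
    intro b tot hpw hcov hmem hb0 hbn
    have hpw_head := (List.pairwise_cons.mp hpw).1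
    have hpw_rest := (List.pairwise_cons.mp hpw).2
    have hh0 : 0 ≤ h := hmem h (by simp)
    simp only [List.foldl_cons]
    by_cases hlt : h < b
    · simp only [if_pos hlt]
      rw [ih h (tot - (b - h) * PySem.List.pyGetD (x :: t) h 0) hpw_rest
          (fun j hj0 hjh => by
            have hjb : j ∈ h :: rest := hcov j hj0 (by omega)
            rcases List.mem_cons.mp hjb with he | hr
            · omega
            · exact hr)
          (fun i hi => hmem i (List.mem_cons_of_mem _ hi)) hh0 (by omega)]
      have hconst : ∀ i : Nat, h.toNat ≤ i → i < b.toNat →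
          (pmf x t).getD i 0 = PySem.List.pyGetD (x :: t) h 0 := by
        intro i hi1 hi2
        have hilen : i ≤ t.length := by
          simp only [List.length_cons] at hbn; omega
        have hget : PySem.List.pyGetD (x :: t) h 0 = (x :: t).getD h.toNat 0 :=
          PySem.List.pyGetD_of_nonneg _ _ hh0
        refine le_antisymm ?_ ?_
        · rw [hget]; exact pmf_le_entry t x i h.toNat hi1 hilen
        · obtain ⟨j, hj, hv⟩ := pmf_attained t x i hilen
          rw [hv]
          by_cases hje : (j : Int) = h
          · rw [hget]
            have : j = h.toNat := by omega
            rw [this]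
          · have hjmem : (j : Int) ∈ h :: rest := hcov j (by positivity) (by omega)
            have hjr : (j : Int) ∈ rest := by
              rcases List.mem_cons.mp hjmem with he | hr
              · exact absurd he hje
              · exact hr
            have := hpw_head _ hjr
            rwa [PySem.List.pyGetD_natCast] at this
      have hsum := sum_take_const (pmf x t) (PySem.List.pyGetD (x :: t) h 0) h.toNat b.toNat
        (by omega) (by rw [length_pmf]; simp only [List.length_cons] at hbn; omega) hconst
      rw [hsum]
      have hb' : ((b.toNat : Int) - h.toNat) = b - h := by omega
      rw [hb']
      ring
    · simp only [if_neg hlt]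
      exact ih b tot hpw_rest
        (fun j hj0 hjb => by
          have := hcov j hj0 hjb
          rcases List.mem_cons.mp this with he | hr
          · omega
          · exact hr)
        (fun i hi => hmem i (List.mem_cons_of_mem _ hi)) hb0 hbn

-- descending scan: any value-antisorted cover of (b, n) accumulates +Σ suffix maxima over (b, n)
theorem descLoop (xs : List Int) :
    ∀ (is : List Int) (b tot : Int),
    is.Pairwise (fun a c => PySem.List.pyGetD xs c 0 ≤ PySem.List.pyGetD xs a 0) →
    (∀ j : Int, b < j → j < xs.length → j ∈ is) →
    (∀ i ∈ is, 0 ≤ i ∧ i < xs.length) →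
    -1 ≤ b → b < xs.length →
    (is.foldl
      (fun (s : Int × Int) i =>
        if s.1 < i then (i, s.2 + (i - s.1) * PySem.List.pyGetD xs i 0) else s) (b, tot)).2
      = tot + ((smf xs).drop (b + 1).toNat).sum := by
  intro is
  induction is with
  | nil =>
    intro b tot _ hcov _ hb0 hbn
    have hb : b + 1 = xs.length := by
      by_contra h
      exact absurd (hcov (b + 1) (by omega) (by omega)) (by simp)
    have : (b + 1).toNat = (smf xs).length := by rw [length_smf]; omega
    simp [this]
  | cons h rest ih =>
    intro b tot hpw hcov hmem hb0 hbn
    have hpw_head := (List.pairwise_cons.mp hpw).1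
    have hpw_rest := (List.pairwise_cons.mp hpw).2
    have hh := hmem h (by simp)
    simp only [List.foldl_cons]
    by_cases hlt : b < h
    · simp only [if_pos hlt]
      rw [ih h (tot + (h - b) * PySem.List.pyGetD xs h 0) hpw_rest
          (fun j hjh hjn => by
            have hjb : j ∈ h :: rest := hcov j (by omega) hjn
            rcases List.mem_cons.mp hjb with he | hr
            · omega
            · exact hr)
          (fun i hi => hmem i (List.mem_cons_of_mem _ hi)) (by omega) hh.2]
      have hconst : ∀ i : Nat, (b + 1).toNat ≤ i → i < (h + 1).toNat →
          (smf xs).getD i 0 = PySem.List.pyGetD xs h 0 := by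
        intro i hi1 hi2
        have hget : PySem.List.pyGetD xs h 0 = xs.getD h.toNat 0 :=
          PySem.List.pyGetD_of_nonneg _ _ hh.1
        refine le_antisymm ?_ ?_
        · obtain ⟨j, hj1, hj2, hv⟩ := smf_attained xs i (by omega)
          rw [hv]
          by_cases hje : (j : Int) = h
          · rw [hget]
            have : j = h.toNat := by omega
            rw [this]
          · have hjmem : (j : Int) ∈ h :: rest := hcov j (by omega) (by exact_mod_cast hj2)
            have hjr : (j : Int) ∈ rest := by
              rcases List.mem_cons.mp hjmem with he | hr
              · exact absurd he hje
              · exact hr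
            have := hpw_head _ hjr
            rwa [PySem.List.pyGetD_natCast] at this
        · rw [hget]
          exact entry_le_smf xs i h.toNat (by omega) (by omega)
      have hsum := sum_drop_const (smf xs) (PySem.List.pyGetD xs h 0) (b + 1).toNat (h + 1).toNat
        (by omega) (by rw [length_smf]; omega) hconst
      rw [hsum]
      have hb' : (((h + 1).toNat : Int) - (b + 1).toNat) = h - b := by omega
      rw [hb']
      ring
    · simp only [if_neg hlt]
      exact ih b tot hpw_rest
        (fun j hjb hjn => by
          have := hcov j hjb hjn
          rcases List.mem_cons.mp this with he | hr
          · omega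
          · exact hr)
        (fun i hi => hmem i (List.mem_cons_of_mem _ hi)) hb0 hbn

theorem altB (x : Int) (t : List Int) :
    calculate_wish_value_alt (x :: t) = (smf (x :: t)).sum - (pmf x t).sum := by
  unfold calculate_wish_value_alt
  simp only [List.length_cons]
  set xs := x :: t with hxs
  set n : Int := ((t.length + 1 : Nat) : Int) with hn
  set key : Int → Int := fun i => PySem.List.pyGetD xs i 0 with hkey
  set order := PySem.List.sorted (PySem.List.pyRange 0 n 1) key false with horder
  have hmem_order : ∀ j : Int, j ∈ order ↔ 0 ≤ j ∧ j < n := by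
    intro j
    rw [horder, PySem.List.mem_sorted, PySem.List.mem_pyRange_one]
  have hlen : xs.length = n := by simp [hxs, hn]
  have h1 := ascLoop x t order n 0 (PySem.List.sorted_pairwise _ _)
    (fun j hj0 hjn => (hmem_order j).mpr ⟨hj0, hjn⟩)
    (fun i hi => ((hmem_order i).mp hi).1)
    (by positivity) (by rw [hlen])
  have h2 := descLoop xs order.reverse (-1)
    ((order.foldl (fun (s : Int × Int) i =>
        if i < s.1 then (i, s.2 - (s.1 - i) * PySem.List.pyGetD xs i 0) else s) (n, 0)).2)
    (by
      rw [List.pairwise_reverse]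
      exact PySem.List.sorted_pairwise _ _)
    (fun j hj0 hjn => by
      rw [List.mem_reverse]
      exact (hmem_order j).mpr ⟨by omega, by rwa [hlen] at hjn⟩)
    (fun i hi => by
      have := (hmem_order i).mp (List.mem_reverse.mp hi)
      exact ⟨this.1, by rw [hlen]; exact this.2⟩)
    (by omega) (by rw [hlen, hn]; omega)
  simp only [] at h2 ⊢
  rw [h2, h1]
  have hpt : (pmf x t).take n.toNat = pmf x t := by
    apply List.take_of_length_le
    rw [length_pmf]; omega
  have hsd : (smf xs).drop ((-1 : Int) + 1).toNat = smf xs := by norm_num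
  rw [hpt, hsd]
  ring

theorem set_append_len (A : List Int) (b v : Int) (B : List Int) :
    (A ++ b :: B).set A.length v = A ++ v :: B := by
  induction A with
  | nil => rfl
  | cons a A ih => simp [ih]

theorem mfl_loop (x : Int) (t : List Int) (k : Nat) (hk : k ≤ t.length) :
    (PySem.List.pyRange 1 (1 + (k : Int)) 1).foldl
      (fun arr i => PySem.List.pySetD arr i
        (min (PySem.List.pyGetD (x :: t) i 0) (PySem.List.pyGetD arr (i - 1) 0)))
      (x :: List.replicate t.length 0)
      = (pmf x t).take (k+1) ++ List.replicate (t.length - k) 0 := by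
  induction k with
  | zero =>
    rw [PySem.List.pyRange_one_eq_nil (by omega)]
    simp only [List.foldl_nil, Nat.sub_zero]
    cases t with
    | nil => simp [pmf]
    | cons b u => simp [pmf]
  | succ k ih =>
    have hk' : k ≤ t.length := by omega
    have hcast : (1 : Int) + ((k:Nat)+1 : Nat) = (1 + (k:Int)) + 1 := by omega
    rw [hcast, PySem.List.pyRange_one_succ_right (by omega), List.foldl_append,
        ih hk', List.foldl_cons, List.foldl_nil]
    have hik : (1 + (k:Int)) = ((k+1 : Nat) : Int) := by push_cast; ring
    have hlenpmf : (pmf x t).length = t.length + 1 := length_pmf x t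
    have htake : ((pmf x t).take (k+1)).length = k + 1 := by
      rw [List.length_take]; omega
    have hget1 : PySem.List.pyGetD (x :: t) (1 + (k:Int)) 0 = t.getD k 0 := by
      rw [hik, PySem.List.pyGetD_natCast]
      simp
    have hget2 : PySem.List.pyGetD
        ((pmf x t).take (k+1) ++ List.replicate (t.length - k) 0) ((1 + (k:Int)) - 1) 0
        = (pmf x t).getD k 0 := by
      have : (1 + (k:Int)) - 1 = ((k:Nat) : Int) := by omega
      rw [this, PySem.List.pyGetD_natCast, List.getD_append _ _ _ _ (by omega)]
      have hkl : k < ((pmf x t).take (k+1)).length := by omega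
      rw [List.getD_eq_getElem _ _ hkl, List.getElem_take,
          List.getD_eq_getElem _ _ (by omega)]
    rw [hget1, hget2, hik, PySem.List.pySetD_natCast]
    have hmin : min (t.getD k 0) ((pmf x t).getD k 0) = (pmf x t).getD (k+1) 0 :=
      (pmf_getD_succ t x k (by omega)).symm
    rw [hmin]
    have hrep : List.replicate (t.length - k) (0:Int)
        = (0:Int) :: List.replicate (t.length - (k+1)) 0 := by
      rw [← List.replicate_succ]; congr 1; omega
    have hset := set_append_len ((pmf x t).take (k+1)) 0 ((pmf x t).getD (k+1) 0)
      (List.replicate (t.length - (k+1)) 0)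
    rw [htake] at hset
    rw [hrep, hset]
    have htk : (pmf x t).take (k+2) = (pmf x t).take (k+1) ++ [(pmf x t).getD (k+1) 0] := by
      rw [List.take_add_one, List.getElem?_eq_getElem (by omega),
          List.getD_eq_getElem _ _ (by omega)]
      simp
    rw [htk]
    simp

theorem mfr_loop (xs : List Int) (hxs : xs ≠ []) (j : Nat) (hj : j ≤ xs.length - 1) :
    (PySem.List.pyRange ((j : Int) - 1) (-1) (-1)).foldl
      (fun arr i => PySem.List.pySetD arr i
        (max (PySem.List.pyGetD xs i 0) (PySem.List.pyGetD arr (i + 1) 0)))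
      (List.replicate j 0 ++ (smf xs).drop j)
      = smf xs := by
  have hlen : 1 ≤ xs.length := List.length_pos_iff.mpr hxs
  have hsml : (smf xs).length = xs.length := length_smf xs
  induction j with
  | zero =>
    rw [show ((0:Nat):Int) - 1 = -1 by norm_num, PySem.List.pyRange_neg_one_eq_nil (by omega)]
    simp
  | succ j ih =>
    have hj' : j ≤ xs.length - 1 := by omega
    have hjlt : j + 1 < xs.length := by omega
    rw [show ((j+1 : Nat):Int) - 1 = (j:Int) by push_cast; ring,
        PySem.List.pyRange_neg_one_cons (by omega), List.foldl_cons]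
    have hget1 : PySem.List.pyGetD xs ((j:Int)) 0 = xs.getD j 0 := by
      rw [PySem.List.pyGetD_natCast]
    have hget2 : PySem.List.pyGetD
        (List.replicate (j+1) 0 ++ (smf xs).drop (j+1)) ((j:Int) + 1) 0
        = (smf xs).getD (j+1) 0 := by
      rw [show ((j:Int) + 1) = ((j+1 : Nat):Int) by push_cast; ring, PySem.List.pyGetD_natCast]
      have h1 : j + 1 < (smf xs).length := by omega
      rw [List.getD_eq_getElem _ _ (by simp; omega),
          List.getElem_append_right (by simp), List.getD_eq_getElem _ _ h1]
      simp
    rw [hget1, hget2, PySem.List.pySetD_natCast]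
    have hmax : max (xs.getD j 0) ((smf xs).getD (j+1) 0) = (smf xs).getD j 0 :=
      (smf_getD_succ xs j hjlt).symm
    rw [hmax]
    have hrep : List.replicate (j+1) (0:Int) ++ (smf xs).drop (j+1)
        = List.replicate j 0 ++ (0:Int) :: (smf xs).drop (j+1) := by
      rw [List.replicate_succ']; simp
    have hset := set_append_len (List.replicate j (0:Int)) 0 ((smf xs).getD j 0)
      ((smf xs).drop (j+1))
    rw [List.length_replicate] at hset
    rw [hrep, hset]
    have hdrop : (smf xs).drop j = (smf xs).getD j 0 :: (smf xs).drop (j+1) := by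
      rw [List.drop_eq_getElem_cons (by omega), List.getD_eq_getElem _ _ (by omega)]
    rw [← hdrop]
    exact ih hj'

theorem pmf_le (t : List Int) (x : Int) (j : Nat) (hj : j ≤ t.length) :
    (pmf x t).getD j 0 ≤ (x :: t).getD j 0 := by
  exact pmf_le_entry t x j j le_rfl hj

theorem le_smf (xs : List Int) (j : Nat) (hj : j < xs.length) :
    xs.getD j 0 ≤ (smf xs).getD j 0 := by
  exact entry_le_smf xs j j le_rfl hj

theorem sum_loop (u v : List Int) (n : Nat) (hu : u.length = n) (hv : v.length = n)
    (hle : ∀ i : Nat, i < n → v.getD i 0 ≤ u.getD i 0) (k : Nat) (hk : k ≤ n) :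
    (PySem.List.pyRange 0 (k : Int) 1).foldl
      (fun acc i => acc + |PySem.List.pyGetD u i 0 - PySem.List.pyGetD v i 0|) 0
      = (u.take k).sum - (v.take k).sum := by
  induction k with
  | zero =>
    rw [show ((0:Nat):Int) = 0 by norm_num, PySem.List.pyRange_one_eq_nil (by omega)]
    simp
  | succ k ih =>
    rw [show ((k+1 : Nat):Int) = (k:Int) + 1 by push_cast; ring,
        PySem.List.pyRange_one_succ_right (by omega), List.foldl_append,
        ih (by omega), List.foldl_cons, List.foldl_nil,
        PySem.List.pyGetD_natCast, PySem.List.pyGetD_natCast]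
    have h1 : |u.getD k 0 - v.getD k 0| = u.getD k 0 - v.getD k 0 :=
      abs_of_nonneg (by have := hle k (by omega); omega)
    rw [h1, List.sum_take_succ _ _ (show k < u.length by omega),
        List.sum_take_succ _ _ (show k < v.length by omega),
        List.getD_eq_getElem _ _ (by omega), List.getD_eq_getElem _ _ (by omega)]
    ring

theorem pySetD_neg_one_append (A : List Int) (b v : Int) :
    PySem.List.pySetD (A ++ [b]) (-1) v = A ++ [v] := by
  simp [PySem.List.pySetD, PySem.List.pySet?, PySem.List.pyIdx?]

theorem mainA (x : Int) (t : List Int) :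
    calculate_wish_value (x :: t) = (smf (x :: t)).sum - (pmf x t).sum := by
  have hxs : (x :: t) ≠ [] := by simp
  have hsml : (smf (x :: t)).length = t.length + 1 := by rw [length_smf]; rfl
  have hpml : (pmf x t).length = t.length + 1 := length_pmf x t
  simp only [calculate_wish_value, List.length_cons]
  have hE1 : PySem.List.pySetD (List.replicate (t.length + 1) (0:Int)) (-1)
      (PySem.List.pyGetD (x :: t) (-1) 0)
      = List.replicate t.length 0 ++ (smf (x :: t)).drop t.length := by
    rw [List.replicate_succ', PySem.List.pyGetD_neg_one _ _ hxs, pySetD_neg_one_append]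
    congr 1
    rw [List.drop_eq_getElem_cons (by omega), List.drop_eq_nil_of_le (by omega)]
    congr 1
    · rw [List.getLast_eq_getElem]
      have h2 := smf_last (x :: t) t.length (by simp)
      rw [List.getD_eq_getElem _ _ (by omega), List.getD_eq_getElem _ _ (by simp)] at h2
      simpa using h2.symm
  rw [hE1]
  have hrng : ((t.length + 1 : Nat) : Int) - 2 = ((t.length : Nat) : Int) - 1 := by push_cast; ring
  rw [hrng, mfr_loop (x :: t) hxs t.length (by simp)]
  have hE3 : PySem.List.pySetD (List.replicate (t.length + 1) (0:Int)) 0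
      (PySem.List.pyGetD (x :: t) 0 0)
      = x :: List.replicate t.length 0 := by
    rw [PySem.List.pyGetD_zero_cons, List.replicate_succ]
    simp [PySem.List.pySetD, PySem.List.pySet?, PySem.List.pyIdx?]
  rw [hE3]
  have hrng2 : ((t.length + 1 : Nat) : Int) = 1 + ((t.length : Nat) : Int) := by push_cast; ring
  rw [hrng2, mfl_loop x t t.length le_rfl]
  rw [Nat.sub_self, List.replicate_zero, List.append_nil,
      List.take_of_length_le (by omega)]
  have h5 := sum_loop (smf (x :: t)) (pmf x t) (t.length + 1) hsml hpml
    (fun i hi => le_trans (pmf_le t x i (by omega)) (le_smf (x :: t) i (by simpa using hi)))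
    (t.length + 1) le_rfl
  rw [List.take_of_length_le (by omega), List.take_of_length_le (by omega)] at h5
  rw [hrng2] at h5
  exact h5

-- ===== VERDICT (by name: the statement is the Claim_ definition above) =====
theorem calculate_wish_value_spec : Claim_equal_calculate_wish_value := by
  intro brightness _ hpre
  unfold Spec_calculate_wish_value
  cases brightness with
  | nil => exact absurd rfl hpre
  | cons x t => rw [mainA, altB]
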